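-- pv_equiv track=rewrite | github.com/neurohaze/Basic-Calculator | main.py | collaps_unary
-- ===== SOURCE A (Python) =====
-- def collaps_unary(equation):
-- 	non_unary_symbols = ['.', '*', '/']
-- 	output = []
--
-- 	plus_cnt = 0
-- 	minus_cnt = 0
--
-- 	for char in equation:
-- 		if char.isdigit():
-- 			if plus_cnt + minus_cnt == 0:
-- 				output.append(char)
-- 				continue
--
-- 			elif minus_cnt % 2 == 0:
-- 				output.append("+")
--
-- 			else:
-- 				output.append("-")
--
-- 			plus_cnt = 0
-- 			minus_cnt = 0
--
-- 			output.append(char)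
-- 			continue
--
-- 		elif char in non_unary_symbols:
-- 			output.append(char)
--
-- 		elif char == '+':
-- 			plus_cnt += 1
--
-- 		elif char == '-':
-- 			minus_cnt += 1
--
-- 	res = []
-- 	num = ""
-- 	for char in output:
-- 		if char == '.' or char.isdigit():
-- 			num += char
-- 		elif char in ['*', '/', '-', '+']:
-- 			res.append(num)
-- 			res.append(char)
-- 			num = ""
-- 	res.append(num)
--
-- 	res = [x for x in res if x != ""]
--
-- 	return res
-- ===== SOURCE B (Python) =====
-- def collaps_unary(equation):
--     res = []
--     buf = ""
--     plus_cnt = 0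
--     minus_cnt = 0
--     for char in equation:
--         if char.isdigit():
--             if plus_cnt + minus_cnt != 0:
--                 if buf:
--                     res.append(buf)
--                 res.append("+" if minus_cnt % 2 == 0 else "-")
--                 plus_cnt = 0
--                 minus_cnt = 0
--                 buf = char
--             else:
--                 buf += char
--         elif char == '.':
--             buf += char
--         elif char == '*' or char == '/':
--             if buf:
--                 res.append(buf)
--             res.append(char)
--             buf = ""
--         elif char == '+':
--             plus_cnt += 1
--         elif char == '-':
--             minus_cnt += 1
--     if buf:
--         res.append(buf)
--     return res
-- ===== Notes on version B (the rewrite author's own statement) =====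
-- stated objective: simpler
-- what changed: A's two passes (a char-level sign-collapsing pass building an intermediate char list, then a tokenizing pass plus a final empty-string filter) are fused into one pass over the input that maintains a number buffer and the sign counters and emits tokens directly, never producing empty tokens.
import Mathlib
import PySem

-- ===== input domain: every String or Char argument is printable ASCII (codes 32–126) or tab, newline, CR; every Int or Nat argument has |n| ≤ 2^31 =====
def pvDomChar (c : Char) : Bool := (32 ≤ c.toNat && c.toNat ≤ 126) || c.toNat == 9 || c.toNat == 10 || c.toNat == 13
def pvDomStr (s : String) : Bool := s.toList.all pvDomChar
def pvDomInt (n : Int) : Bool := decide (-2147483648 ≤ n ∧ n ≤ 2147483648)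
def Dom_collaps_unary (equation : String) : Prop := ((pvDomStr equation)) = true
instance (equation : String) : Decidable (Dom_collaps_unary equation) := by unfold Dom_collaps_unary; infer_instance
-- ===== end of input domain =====

-- B fuses A's two passes (sign-collapsing pass over chars, then tokenizing pass + empty filter)
-- into one pass with a number buffer; objective: simpler (one traversal, no intermediate char list).

-- ===== PORT A =====
-- first loop of A: builds the intermediate char list `output`
-- (Char.isDigit is exact for Python's str.isdigit on the printable-ASCII domain)
def passA1 : List Char → Nat → Nat → List Char
  | [], _, _ => []
  | c :: cs, p, m =>
    if c.isDigit then
      if p + m == 0 then c :: passA1 cs p m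
      else (if m % 2 == 0 then '+' else '-') :: c :: passA1 cs 0 0
    else if c == '.' || c == '*' || c == '/' then c :: passA1 cs p m
    else if c == '+' then passA1 cs (p + 1) m
    else if c == '-' then passA1 cs p (m + 1)
    else passA1 cs p m

-- second loop of A: tokenizes `output` into `res` (final `res.append(num)` is the [] case)
def passA2 : List Char → String → List String
  | [], num => [num]
  | c :: cs, num =>
    if c == '.' || c.isDigit then passA2 cs (num.push c)
    else if c == '*' || c == '/' || c == '-' || c == '+' then
      num :: String.mk [c] :: passA2 cs ""
    else passA2 cs num

def collaps_unary (equation : String) : List String :=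
  (passA2 (passA1 equation.toList 0 0) "").filter (· != "")

-- ===== PORT B =====
def passB : List Char → String → Nat → Nat → List String
  | [], buf, _, _ => if buf != "" then [buf] else []
  | c :: cs, buf, p, m =>
    if c.isDigit then
      if p + m != 0 then
        (if buf != "" then [buf] else []) ++
          (if m % 2 == 0 then "+" else "-") :: passB cs (String.mk [c]) 0 0
      else passB cs (buf.push c) p m
    else if c == '.' then passB cs (buf.push c) p m
    else if c == '*' || c == '/' then
      (if buf != "" then [buf] else []) ++ String.mk [c] :: passB cs "" p m
    else if c == '+' then passB cs buf (p + 1) m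
    else if c == '-' then passB cs buf p (m + 1)
    else passB cs buf p m

def collaps_unary_alt (equation : String) : List String :=
  passB equation.toList "" 0 0

-- ===== PRECONDITION & SPEC =====
def Spec_collaps_unary (equation : String) (out : List String) : Prop := out = collaps_unary_alt equation
instance (equation : String) (out : List String) : Decidable (Spec_collaps_unary equation out) := by unfold Spec_collaps_unary; infer_instance

-- ===== CLAIM (what is proved, stated in full; the proofs are below) =====
def Claim_equal_collaps_unary : Prop := ∀ (equation : String), Dom_collaps_unary equation → Spec_collaps_unary equation (collaps_unary equation)

-- ===== LEMMAS AND PROOFS =====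

-- main invariant: fusing A's two passes with pending number `num` equals B's single pass
theorem fuse (cs : List Char) : ∀ (p m : Nat) (num : String),
    (passA2 (passA1 cs p m) num).filter (· != "") = passB cs num p m := by
  induction cs with
  | nil =>
    intro p m num
    simp only [passA1, passA2, passB, List.filter]
    cases h : (num != "") <;> simp [h]
  | cons c cs ih =>
    intro p m num
    simp only [passA1, passB]
    by_cases hd : c.isDigit = true
    · have hdot : (c == '.') = false := by
        rcases eq_or_ne c '.' with h | h
        · subst h; simp at hd
        · simp [h]
      by_cases hz : p + m = 0
      · simp only [hd, show (p + m == 0) = true by simpa using hz,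
          show (p + m != 0) = false by simpa using hz, if_true, Bool.false_eq_true, if_false,
          passA2, hdot, Bool.false_or]
        exact ih p m (num.push c)
      · simp only [hd, show (p + m == 0) = false by simpa using hz,
          show (p + m != 0) = true by simpa using hz, if_true, Bool.false_eq_true, if_false]
        cases hpar : (m % 2 == 0)
        · simp only [hpar, Bool.false_eq_true, if_false, if_true, passA2,
            show ('-' : Char).isDigit = false from by decide,
            show (('-' : Char) == '.') = false from by decide,
            show (('-' : Char) == '*') = false from by decide,
            show (('-' : Char) == '/') = false from by decide,
            show (('-' : Char) == '-') = true from by decide,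
            show (('-' : Char) == '+') = false from by decide,
            Bool.true_or, Bool.or_true, Bool.false_or, Bool.or_false, Bool.false_eq_true, if_true, if_false, hdot, hd]
          rw [show ("".push c) = String.mk [c] from rfl]
          cases hb : (num != "") <;>
            simp [List.filter, hb, ih 0 0 (String.mk [c]), show (String.mk ['-'] != "") = true from by decide,
              show String.mk ['-'] = "-" from rfl]
        · simp only [hpar, Bool.false_eq_true, if_false, if_true, passA2,
            show ('+' : Char).isDigit = false from by decide,
            show (('+' : Char) == '.') = false from by decide,
            show (('+' : Char) == '*') = false from by decide,
            show (('+' : Char) == '/') = false from by decide,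
            show (('+' : Char) == '-') = false from by decide,
            show (('+' : Char) == '+') = true from by decide,
            Bool.true_or, Bool.or_true, Bool.false_or, Bool.or_false, Bool.false_eq_true, if_true, if_false, hdot, hd]
          rw [show ("".push c) = String.mk [c] from rfl]
          cases hb : (num != "") <;>
            simp [List.filter, hb, ih 0 0 (String.mk [c]), show (String.mk ['+'] != "") = true from by decide,
              show String.mk ['+'] = "+" from rfl]
    · have hd' : c.isDigit = false := by simpa using hd
      rcases eq_or_ne c '.' with h | hdot
      · subst h
        simp only [hd', Bool.false_eq_true, if_false, beq_self_eq_true, Bool.true_or, if_true,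
          passA2]
        exact ih p m (num.push '.')
      · rcases eq_or_ne c '*' with h | hstar
        · subst h
          simp only [passA2,
            show ('*' : Char).isDigit = false from by decide,
            show (('*' : Char) == '.') = false from by decide,
            show (('*' : Char) == '*') = true from by decide,
            show (('*' : Char) == '/') = false from by decide,
            show (('*' : Char) == '-') = false from by decide,
            show (('*' : Char) == '+') = false from by decide,
            Bool.true_or, Bool.or_true, Bool.false_or, Bool.or_false, Bool.false_eq_true, if_true, if_false]
          cases hb : (num != "") <;>
            simp [List.filter, hb, ih p m "", show (String.mk ['*'] != "") = true from by decide,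
              show String.mk ['*'] = "*" from rfl]
        · rcases eq_or_ne c '/' with h | hslash
          · subst h
            simp only [passA2,
              show ('/' : Char).isDigit = false from by decide,
              show (('/' : Char) == '.') = false from by decide,
              show (('/' : Char) == '*') = false from by decide,
              show (('/' : Char) == '/') = true from by decide,
              show (('/' : Char) == '-') = false from by decide,
              show (('/' : Char) == '+') = false from by decide,
              Bool.true_or, Bool.or_true, Bool.false_or, Bool.or_false, Bool.false_eq_true, if_true, if_false]
            cases hb : (num != "") <;>
              simp [List.filter, hb, ih p m "", show (String.mk ['/'] != "") = true from by decide,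
                show String.mk ['/'] = "/" from rfl]
          · rcases eq_or_ne c '+' with h | hplus
            · subst h
              simp only [
                show ('+' : Char).isDigit = false from by decide,
            show (('+' : Char) == '.') = false from by decide,
            show (('+' : Char) == '*') = false from by decide,
            show (('+' : Char) == '/') = false from by decide,
            show (('+' : Char) == '-') = false from by decide,
            show (('+' : Char) == '+') = true from by decide,
                Bool.true_or, Bool.or_true, Bool.false_or, Bool.or_false, Bool.false_eq_true, if_true, if_false]
              exact ih (p + 1) m num
            · rcases eq_or_ne c '-' with h | hminus
              · subst h
                simp only [
                  show ('-' : Char).isDigit = false from by decide,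
              show (('-' : Char) == '.') = false from by decide,
              show (('-' : Char) == '*') = false from by decide,
              show (('-' : Char) == '/') = false from by decide,
              show (('-' : Char) == '-') = true from by decide,
              show (('-' : Char) == '+') = false from by decide,
                  Bool.true_or, Bool.or_true, Bool.false_or, Bool.or_false, Bool.false_eq_true, if_true, if_false]
                exact ih p (m + 1) num
              · simp only [hd', beq_eq_false_iff_ne.mpr hdot, beq_eq_false_iff_ne.mpr hstar,
                  beq_eq_false_iff_ne.mpr hslash, beq_eq_false_iff_ne.mpr hplus,
                  beq_eq_false_iff_ne.mpr hminus, Bool.or_self, Bool.false_eq_true, if_false,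
                  Bool.false_or]
                exact ih p m num

-- ===== VERDICT (by name: the statement is the Claim_ definition above) =====
theorem collaps_unary_spec : Claim_equal_collaps_unary := by
  intro equation _
  unfold Spec_collaps_unary collaps_unary collaps_unary_alt
  exact fuse equation.toList 0 0 ""
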